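-- pv_equiv track=rewrite | github.com/eighths/KnowMal | backend/app/core/static_analyzer/utils/feature_utils.py | filter_nonstandard_domains
-- ===== SOURCE A (Python) =====
-- ALLOWLIST_STD_DOMAINS = {
--     "www.w3.org", "schemas.openxmlformats.org", "purl.org", "schemas.microsoft.com",
--     "openxmlformats.org", "ns.adobe.com", "schemas.xmlsoap.org", "www.w3schools.com",
--     "xml.apache.org", "www.ecma-international.org",
--     "schema.org", "aka.ms", "go.microsoft.com", "learn.microsoft.com",
--     "support.microsoft.com", "officeapps.live.com"
-- }
--
-- def filter_nonstandard_domains(domains):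
--     out = []
--     for d in domains or []:
--         host = (d or "").lower()
--         if host in ALLOWLIST_STD_DOMAINS:
--             continue
--         for allow in ALLOWLIST_STD_DOMAINS:
--             if host.endswith("." + allow):
--                 break
--         else:
--             out.append(d)
--     return sorted(list(dict.fromkeys(out)))
-- ===== SOURCE B (Python) =====
-- ALLOWLIST_STD_DOMAINS = {
--     "www.w3.org", "schemas.openxmlformats.org", "purl.org", "schemas.microsoft.com",
--     "openxmlformats.org", "ns.adobe.com", "schemas.xmlsoap.org", "www.w3schools.com",
--     "xml.apache.org", "www.ecma-international.org",
--     "schema.org", "aka.ms", "go.microsoft.com", "learn.microsoft.com",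
--     "support.microsoft.com", "officeapps.live.com"
-- }
--
--
-- def _dot_suffixes(host):
--     # the host itself plus every substring that follows a '.'
--     return [host] + [host[i + 1:] for i in range(len(host)) if host[i] == '.']
--
--
-- def filter_nonstandard_domains(domains):
--     out = [d for d in (domains or [])
--            if not any(s in ALLOWLIST_STD_DOMAINS
--                       for s in _dot_suffixes((d or "").lower()))]
--     return sorted(set(out))
-- ===== Notes on version B (the rewrite author's own statement) =====
-- stated objective: idiomatic
-- what changed: Instead of checking membership and then scanning the whole allowlist with endswith('.'+allow) per domain, B enumerates each host's dot-suffixes (the host plus every substring after a '.') and keeps the domain only if no suffix is in the allowlist; dedup+sort becomes sorted(set(out)).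
import Mathlib
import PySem

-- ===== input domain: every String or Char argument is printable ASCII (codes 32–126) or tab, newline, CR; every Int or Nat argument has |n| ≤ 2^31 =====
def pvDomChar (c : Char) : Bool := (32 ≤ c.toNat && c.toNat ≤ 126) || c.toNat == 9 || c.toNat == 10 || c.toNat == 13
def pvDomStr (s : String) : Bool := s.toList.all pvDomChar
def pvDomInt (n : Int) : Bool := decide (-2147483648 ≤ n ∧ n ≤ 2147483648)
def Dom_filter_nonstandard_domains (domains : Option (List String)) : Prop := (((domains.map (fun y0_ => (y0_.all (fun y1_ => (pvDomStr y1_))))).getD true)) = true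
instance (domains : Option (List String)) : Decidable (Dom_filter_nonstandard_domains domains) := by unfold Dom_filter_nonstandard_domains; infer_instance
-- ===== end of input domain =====

-- B filters each domain by testing its dot-suffixes against the allowlist once, instead of
-- scanning the whole allowlist with endswith per domain (objective: idiomatic/alternative).

-- ALLOWLIST_STD_DOMAINS, as code-point lists (membership tests compare whole strings)
def pvAllow : List (List Char) :=
  ["www.w3.org".toList, "schemas.openxmlformats.org".toList, "purl.org".toList,
   "schemas.microsoft.com".toList, "openxmlformats.org".toList, "ns.adobe.com".toList,
   "schemas.xmlsoap.org".toList, "www.w3schools.com".toList, "xml.apache.org".toList,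
   "www.ecma-international.org".toList, "schema.org".toList, "aka.ms".toList,
   "go.microsoft.com".toList, "learn.microsoft.com".toList, "support.microsoft.com".toList,
   "officeapps.live.com".toList]

-- ===== PORT A =====
def filter_nonstandard_domains (domains : Option (List String)) : List String :=
  let out := (domains.getD []).foldl (fun out d =>
    let host : List Char := PySem.Chars.lower (if d = "" then "" else d).toList
    if pvAllow.contains host then out
    else if pvAllow.any (fun allow => PySem.Chars.endswith host ('.' :: allow)) then out
    else out ++ [d]) []
  PySem.List.sorted (PySem.List.dedup out) (fun x => x) false

-- ===== PORT B =====
-- [host[i+1:] for i in range(len(host)) if host[i] == '.']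
def pvDotSuffixes : List Char → List (List Char)
  | [] => []
  | c :: rest => (if c = '.' then [rest] else []) ++ pvDotSuffixes rest

def filter_nonstandard_domains_alt (domains : Option (List String)) : List String :=
  let out := (domains.getD []).filter (fun d =>
    let host : List Char := PySem.Chars.lower (if d = "" then "" else d).toList
    !(host :: pvDotSuffixes host).any (fun s => pvAllow.contains s))
  PySem.List.sorted (PySem.Set.ofList out) (fun x => x) false

-- ===== PRECONDITION & SPEC =====
def Spec_filter_nonstandard_domains (domains : Option (List String)) (out : List String) : Prop := out = filter_nonstandard_domains_alt domains
instance (domains : Option (List String)) (out : List String) : Decidable (Spec_filter_nonstandard_domains domains out) := by unfold Spec_filter_nonstandard_domains; infer_instance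

-- ===== CLAIM (what is proved, stated in full; the proofs are below) =====
def Claim_equal_filter_nonstandard_domains : Prop := ∀ (domains : Option (List String)), Dom_filter_nonstandard_domains domains → Spec_filter_nonstandard_domains domains (filter_nonstandard_domains domains)

-- ===== LEMMAS AND PROOFS =====

-- a suffix "."+allow of host is exactly an entry of pvDotSuffixes host
theorem mem_pvDotSuffixes_iff (cs as : List Char) :
    as ∈ pvDotSuffixes cs ↔ ('.' :: as) <:+ cs := by
  induction cs with
  | nil => simp [pvDotSuffixes]
  | cons c rest ih =>
    rw [List.suffix_cons_iff]
    simp only [pvDotSuffixes, List.mem_append]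
    by_cases hc : c = '.'
    · subst hc; simp [ih]
    · simp [hc, ih, Ne.symm hc]

-- the per-element tests of the two ports agree
theorem keep_eq (host : List Char) :
    (!(host :: pvDotSuffixes host).any (fun s => pvAllow.contains s)) =
      (!(pvAllow.contains host ||
         pvAllow.any (fun allow => PySem.Chars.endswith host ('.' :: allow)))) := by
  have h : ((pvDotSuffixes host).any fun s => pvAllow.contains s) =
      (pvAllow.any fun allow => PySem.Chars.endswith host ('.' :: allow)) := by
    rw [Bool.eq_iff_iff]
    simp only [List.any_eq_true, List.contains_eq_mem, decide_eq_true_eq,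
      PySem.Chars.endswith_iff, mem_pvDotSuffixes_iff]
    exact ⟨fun ⟨s, hs, hm⟩ => ⟨s, hm, hs⟩, fun ⟨a, ha, hs⟩ => ⟨a, hs, ha⟩⟩
  simp only [List.any_cons, h]

-- A's skip/skip/append loop is a filter
theorem foldl_skip_skip_append {α : Type} (p q : α → Bool) (xs acc : List α) :
    xs.foldl (fun out d => if p d then out else if q d then out else out ++ [d]) acc =
      acc ++ xs.filter (fun d => !(p d || q d)) := by
  induction xs generalizing acc with
  | nil => simp
  | cons d rest ih =>
    rw [List.foldl_cons, List.filter_cons]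
    cases hp : p d <;> cases hq : q d <;> simp [hp, hq, ih]

-- ===== VERDICT (by name: the statement is the Claim_ definition above) =====
theorem filter_nonstandard_domains_spec : Claim_equal_filter_nonstandard_domains := by
  intro domains _
  unfold Spec_filter_nonstandard_domains filter_nonstandard_domains filter_nonstandard_domains_alt
  dsimp only
  rw [foldl_skip_skip_append
        (fun d => pvAllow.contains (PySem.Chars.lower (if d = "" then "" else d).toList))
        (fun d => pvAllow.any (fun allow =>
          PySem.Chars.endswith (PySem.Chars.lower (if d = "" then "" else d).toList) ('.' :: allow))),
      List.nil_append, PySem.List.dedup_eq_ofList]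
  congr 1
  congr 1
  refine List.filter_congr (fun d _ => ?_)
  exact (keep_eq _).symm
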